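-- pv_equiv track=rewrite | github.com/miams/RMCitecraft | src/rmcitecraft/models/census_citation.py | _parse_locality
-- ===== SOURCE A (Python) =====
-- def _parse_locality(locality_full: str) -> tuple[str | None, str | None]:
--     """Parse locality name and type from combined string.
--
--     Examples:
--         "Jefferson Township" → ("Jefferson", "Township")
--         "Baltimore (Independent City)" → ("Baltimore", "Independent City")
--         "New York" → ("New York", None)
--
--     Returns:
--         Tuple of (locality_name, locality_type)
--     """
--     # Check for parenthetical type: "Baltimore (Independent City)"
--     if "(" in locality_full and locality_full.endswith(")"):
--         locality = locality_full[: locality_full.index("(")].strip()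
--         locality_type = locality_full[locality_full.index("(") + 1 : -1].strip()
--         return locality, locality_type
--
--     # Check for space-separated type: "Jefferson Township"
--     type_keywords = [
--         "Township",
--         "City",
--         "Village",
--         "Borough",
--         "Town",
--         "Parish",
--         "District",
--         "Precinct",
--         "Ward",
--         "Hundred",
--     ]
--
--     for keyword in type_keywords:
--         if locality_full.endswith(f" {keyword}"):
--             locality = locality_full[: -len(keyword) - 1].strip()
--             return locality, keyword
--
--     # No recognized type found
--     return locality_full, None
-- ===== SOURCE B (Python) =====
-- _TYPE_KEYWORDS = [
--     "Township", "City", "Village", "Borough", "Town",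
--     "Parish", "District", "Precinct", "Ward", "Hundred",
-- ]
--
--
-- def _parse_locality(locality_full: str) -> tuple:
--     # Parenthetical type: "Baltimore (Independent City)"
--     if "(" in locality_full and locality_full.endswith(")"):
--         i = locality_full.index("(")
--         return locality_full[:i].strip(), locality_full[i + 1 : -1].strip()
--
--     # Keyword phase: a single backward character scan that matches all
--     # patterns "reversed(keyword) + ' '" simultaneously, pruning the
--     # candidate set column by column (naive multi-pattern matching).
--     pats = [(kw[::-1] + " ", kw) for kw in _TYPE_KEYWORDS]
--     n = 0
--     for ch in reversed(locality_full):
--         nxt = []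
--         for rem, kw in pats:
--             if rem[0] == ch:
--                 if len(rem) == 1:
--                     # consumed the whole keyword and its leading space
--                     return locality_full[: len(locality_full) - n - 1].strip(), kw
--                 nxt.append((rem[1:], kw))
--         pats = nxt
--         n += 1
--         if not pats:
--             break
--
--     # No recognized type found
--     return locality_full, None
-- ===== Notes on version B (the rewrite author's own statement) =====
-- stated objective: alternative
-- what changed: The keyword phase no longer runs ten separate endswith suffix comparisons: B does one backward character scan over the string, matching all reversed space-terminated keyword patterns simultaneously and pruning the candidate set column by column (naive multi-pattern matching); the parenthetical branch is unchanged.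
import Mathlib
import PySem

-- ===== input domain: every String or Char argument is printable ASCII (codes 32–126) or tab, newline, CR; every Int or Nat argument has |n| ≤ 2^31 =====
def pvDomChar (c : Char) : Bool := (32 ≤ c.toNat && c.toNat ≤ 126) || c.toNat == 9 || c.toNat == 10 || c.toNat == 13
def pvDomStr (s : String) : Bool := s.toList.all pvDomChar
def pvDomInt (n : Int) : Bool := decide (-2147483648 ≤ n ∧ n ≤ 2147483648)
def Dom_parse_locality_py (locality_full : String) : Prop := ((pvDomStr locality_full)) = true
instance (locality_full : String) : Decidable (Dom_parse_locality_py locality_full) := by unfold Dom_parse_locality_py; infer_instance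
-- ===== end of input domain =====

-- B replaces A's ten endswith tests (one per keyword) by a single backward character scan that
-- matches all reversed space-terminated keyword patterns simultaneously, pruning a candidate set column
-- by column (naive multi-pattern matching); same cost, different algorithm (objective: alternative).

-- ===== PORT A =====
def pvKwA : List (List Char) :=
  ["Township".toList, "City".toList, "Village".toList, "Borough".toList, "Town".toList,
   "Parish".toList, "District".toList, "Precinct".toList, "Ward".toList, "Hundred".toList]

def pvScanKwA (locality_full : String) (cs : List Char) :
    List (List Char) → Option String × Option String
  | [] => (some locality_full, none)
  | kw :: rest =>
    if PySem.Chars.endswith cs (' ' :: kw) then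
      (some (String.ofList (PySem.Chars.strip
              (PySem.List.slice cs none (some (-(kw.length : Int) - 1))))),
       some (String.ofList kw))
    else pvScanKwA locality_full cs rest

def parse_locality_py (locality_full : String) : Option String × Option String :=
  let cs := locality_full.toList
  if PySem.Chars.isIn ['('] cs && PySem.Chars.endswith cs [')'] then
    let i := PySem.Chars.find cs ['(']
    (some (String.ofList (PySem.Chars.strip (PySem.List.slice cs none (some i)))),
     some (String.ofList (PySem.Chars.strip (PySem.List.slice cs (some (i + 1)) (some (-1))))))
  else
    pvScanKwA locality_full cs pvKwA


-- ===== PORT B =====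
-- pats = [(kw[::-1] + " ", kw) for kw in _TYPE_KEYWORDS]   (kw[::-1] is exact list reversal)
def pvPatsB : List (List Char × List Char) :=
  (["Township", "City", "Village", "Borough", "Town",
    "Parish", "District", "Precinct", "Ward", "Hundred"] : List String).map
    (fun kw => (kw.toList.reverse ++ [' '], kw.toList))

-- the inner 'for rem, kw in pats' loop: first full match returns the keyword (Sum.inl),
-- otherwise the surviving one-char-shorter candidates are collected (Sum.inr).
-- rem is never empty in B (patterns are nonempty, matched candidates keep length ≥ 1);
-- the [] branch is the unreachable totalization of Python's rem[0].
def pvSiftB (ch : Char) : List (List Char × List Char) → Sum (List Char) (List (List Char × List Char))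
  | [] => Sum.inr []
  | (rem, kw) :: ps =>
    match rem with
    | [] => pvSiftB ch ps
    | r0 :: rtl =>
      if r0 = ch then
        match rtl with
        | [] => Sum.inl kw
        | _ :: _ =>
          match pvSiftB ch ps with
          | Sum.inl k => Sum.inl k
          | Sum.inr nxt => Sum.inr ((rtl, kw) :: nxt)
      else pvSiftB ch ps

-- the outer 'for ch in reversed(locality_full)' loop with counter n
def pvGoB (s : String) (cs : List Char) :
    List Char → Nat → List (List Char × List Char) → Option String × Option String
  | [], _, _ => (some s, none)
  | ch :: rest, n, pats =>
    match pvSiftB ch pats with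
    | Sum.inl kw =>
        (some (String.ofList (PySem.Chars.strip
                (PySem.List.slice cs none (some ((cs.length : Int) - n - 1))))),
         some (String.ofList kw))
    | Sum.inr nxt => if nxt.isEmpty then (some s, none) else pvGoB s cs rest (n + 1) nxt

def parse_locality_py_alt (locality_full : String) : Option String × Option String :=
  let cs := locality_full.toList
  if PySem.Chars.isIn ['('] cs && PySem.Chars.endswith cs [')'] then
    let i := PySem.Chars.find cs ['(']
    (some (String.ofList (PySem.Chars.strip (PySem.List.slice cs none (some i)))),
     some (String.ofList (PySem.Chars.strip (PySem.List.slice cs (some (i + 1)) (some (-1))))))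
  else
    pvGoB locality_full cs cs.reverse 0 pvPatsB


-- ===== PRECONDITION & SPEC =====
def Spec_parse_locality_py (locality_full : String) (out : Option String × Option String) : Prop := out = parse_locality_py_alt locality_full
instance (locality_full : String) (out : Option String × Option String) : Decidable (Spec_parse_locality_py locality_full out) := by unfold Spec_parse_locality_py; infer_instance

-- ===== CLAIM (what is proved, stated in full; the proofs are below) =====
def Claim_equal_parse_locality_py : Prop := ∀ (locality_full : String), Dom_parse_locality_py locality_full → Spec_parse_locality_py locality_full (parse_locality_py locality_full)

-- ===== LEMMAS AND PROOFS =====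
-- takeWhile keeps only satisfying elements (small fact; no matching Mathlib name found in this version)
theorem pv_mem_takeWhile {c : Char} (l : List Char) (h : c ∈ l.takeWhile (fun c => c != ' ')) :
    c ≠ ' ' := by
  induction l with
  | nil => simp [List.takeWhile] at h
  | cons a l ih =>
    rw [List.takeWhile_cons] at h
    by_cases ha : (a != ' ') = true
    · simp only [ha, if_true, List.mem_cons] at h
      rcases h with rfl | h
      · simpa using ha
      · exact ih h
    · simp [ha] at h

theorem pv_prefix_space (xs : List Char) : ∀ (ys rest : List Char), (' ' ∉ xs) → (' ' ∉ ys) →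
    ((xs ++ [' ']) <+: (ys ++ ' ' :: rest) ↔ xs = ys) := by
  induction xs with
  | nil =>
    intro ys rest _ hys
    cases ys with
    | nil => simp
    | cons b ys' =>
      simp only [List.nil_append, List.cons_append, List.cons_prefix_cons]
      constructor
      · rintro ⟨h1, -⟩
        exact absurd (h1 ▸ List.mem_cons_self ..) hys
      · intro h; cases h
  | cons a xs' ih =>
    intro ys rest hxs hys
    cases ys with
    | nil =>
      simp only [List.cons_append, List.nil_append, List.cons_prefix_cons]
      constructor
      · rintro ⟨rfl, -⟩
        exact absurd (List.mem_cons_self ..) hxs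
      · intro h; cases h
    | cons b ys' =>
      simp only [List.cons_append, List.cons_prefix_cons, List.cons.injEq]
      rw [ih ys' rest (fun h => hxs (List.mem_cons_of_mem _ h)) (fun h => hys (List.mem_cons_of_mem _ h))]

theorem pv_endswith_eq (p t kw : List Char) (ht : ' ' ∉ t) (hkw : ' ' ∉ kw) :
    PySem.Chars.endswith (p ++ ' ' :: t) (' ' :: kw) = decide (t = kw) := by
  have key : PySem.Chars.endswith (p ++ ' ' :: t) (' ' :: kw) = true ↔ t = kw := by
    rw [PySem.Chars.endswith_iff, ← List.reverse_prefix]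
    simp only [List.reverse_cons, List.reverse_append, List.append_assoc, List.singleton_append]
    rw [pv_prefix_space kw.reverse t.reverse p.reverse
          (by simpa using hkw) (by simpa using ht)]
    constructor
    · intro h
      have := congrArg List.reverse h
      simpa using this.symm
    · intro h; rw [h]
  by_cases hq : t = kw
  · simp [hq] at key ⊢
    exact key
  · simp [hq] at key ⊢
    exact key

theorem pv_endswith_nospace (cs kw : List Char) (h : ' ' ∉ cs) :
    PySem.Chars.endswith cs (' ' :: kw) = false := by
  rw [Bool.eq_false_iff]
  intro hT
  rw [PySem.Chars.endswith_iff] at hT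
  obtain ⟨u, hu⟩ := hT
  exact h (hu ▸ by simp)

theorem pv_scan_nospace (s : String) (cs : List Char) (h : ' ' ∉ cs) (kws : List (List Char)) :
    pvScanKwA s cs kws = (some s, none) := by
  induction kws with
  | nil => rfl
  | cons kw rest ih => rw [pvScanKwA, pv_endswith_nospace cs kw h]; simpa using ih

theorem pv_slice_front (p t : List Char) :
    PySem.List.slice (p ++ ' ' :: t) none (some (-(t.length : Int) - 1)) = p := by
  have h1 : (-(t.length : Int) - 1) = -((t.length + 1 : Nat) : Int) := by omega
  rw [h1, PySem.List.slice_to_neg_natCast _ _ (by omega)]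
  have h2 : (p ++ ' ' :: t).length - (t.length + 1) = p.length := by
    simp [List.length_append]
  rw [h2]
  exact List.take_left

theorem pv_scan_spec (s : String) (p t : List Char) (ht : ' ' ∉ t) (kws : List (List Char))
    (hkws : ∀ kw ∈ kws, ' ' ∉ kw) :
    pvScanKwA s (p ++ ' ' :: t) kws =
      if kws.contains t then
        (some (String.ofList (PySem.Chars.strip p)), some (String.ofList t))
      else (some s, none) := by
  induction kws with
  | nil => rfl
  | cons kw rest ih =>
    rw [pvScanKwA, pv_endswith_eq p t kw ht (hkws kw (List.mem_cons_self ..))]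
    by_cases hq : t = kw
    · subst hq
      simp [pv_slice_front]
    · rw [ih (fun k hk => hkws k (List.mem_cons_of_mem _ hk))]
      simp [hq]

theorem pv_dropWhile_cons (l : List Char) (h : l.dropWhile (fun c => c != ' ') ≠ []) :
    l.dropWhile (fun c => c != ' ') = ' ' :: (l.dropWhile (fun c => c != ' ')).tail := by
  induction l with
  | nil => simp at h
  | cons a l ih =>
    rw [List.dropWhile_cons] at h ⊢
    by_cases ha : (a != ' ') = true
    · simp only [ha, if_true] at h ⊢
      exact ih h
    · have ha' : a = ' ' := by simpa using ha
      simp [ha']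

theorem pv_decomp (cs : List Char) (h : ' ' ∈ cs) :
    cs = ((cs.reverse.dropWhile (fun c => c != ' ')).tail).reverse
          ++ ' ' :: (cs.reverse.takeWhile (fun c => c != ' ')).reverse
      ∧ ' ' ∉ (cs.reverse.takeWhile (fun c => c != ' ')).reverse := by
  have hmem : ' ' ∈ cs.reverse := by simpa using h
  have hdrop : cs.reverse.dropWhile (fun c => c != ' ') ≠ [] := by
    intro hnil
    have htw := List.takeWhile_append_dropWhile (p := fun c => c != ' ') (l := cs.reverse)
    rw [hnil, List.append_nil] at htw
    rw [← htw] at hmem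
    exact absurd rfl (pv_mem_takeWhile cs.reverse hmem)
  have hcons := pv_dropWhile_cons cs.reverse hdrop
  have hsplit := List.takeWhile_append_dropWhile (p := fun c => c != ' ') (l := cs.reverse)
  refine ⟨?_, ?_⟩
  · conv => lhs; rw [← List.reverse_reverse cs, ← hsplit]
    rw [hcons]
    simp
  · intro hmem'
    exact absurd rfl (pv_mem_takeWhile cs.reverse (by simpa using hmem'))

-- the candidate step the inner loop performs on a surviving pattern
def pvStepB (ch : Char) : List Char × List Char → Option (List Char × List Char)
  | (r0 :: rtl, kw) => if r0 = ch then some (rtl, kw) else none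
  | ([], _) => none

-- sift with no full match at this column = filter/advance the candidates
theorem pvSift_inr (ch : Char) (pats : List (List Char × List Char))
    (hnone : ∀ pr ∈ pats, pr.1 ≠ [ch]) :
    pvSiftB ch pats = Sum.inr (pats.filterMap (pvStepB ch)) := by
  induction pats with
  | nil => rfl
  | cons pr ps ih =>
    obtain ⟨rem, kw⟩ := pr
    have ihc := ih (fun q hq => hnone q (List.mem_cons_of_mem _ hq))
    match rem with
    | [] => simpa [pvSiftB, pvStepB] using ihc
    | r0 :: rtl =>
      by_cases hc : r0 = ch
      · subst hc
        match rtl with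
        | [] => exact absurd rfl (hnone (⟨[r0], kw⟩) (List.mem_cons_self ..))
        | x :: xs => simp [pvSiftB, pvStepB, ihc]
      · simp [pvSiftB, pvStepB, hc, ihc]

-- sift with a full match whose keyword is determined = early return of that keyword
theorem pvSift_inl (ch : Char) (k₀ : List Char) (pats : List (List Char × List Char))
    (hex : ([ch], k₀) ∈ pats)
    (huniq : ∀ pr ∈ pats, pr.1 = [ch] → pr.2 = k₀) :
    pvSiftB ch pats = Sum.inl k₀ := by
  induction pats with
  | nil => simp at hex
  | cons pr ps ih =>
    obtain ⟨rem, kw⟩ := pr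
    rcases List.mem_cons.mp hex with heq | hmem
    · injection heq with h1 h2
      subst h1; subst h2
      simp [pvSiftB]
    · have ihc := ih hmem (fun q hq => huniq q (List.mem_cons_of_mem _ hq))
      match rem with
      | [] => simpa [pvSiftB] using ihc
      | r0 :: rtl =>
        by_cases hc : r0 = ch
        · subst hc
          match rtl with
          | [] => simpa [pvSiftB] using (huniq (⟨[r0], kw⟩) (List.mem_cons_self ..) rfl)
          | x :: xs => simp [pvSiftB, ihc]
        · simp [pvSiftB, hc, ihc]

-- if no remaining pattern is a prefix of the remaining reversed input, the walk finds nothing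
theorem pvGo_nomatch (s : String) (cs : List Char) :
    ∀ (rcs : List Char) (n : Nat) (pats : List (List Char × List Char)),
    (∀ pr ∈ pats, ¬ pr.1 <+: rcs) → pvGoB s cs rcs n pats = (some s, none) := by
  intro rcs
  induction rcs with
  | nil => intro n pats _; rfl
  | cons ch rest ih =>
    intro n pats hpre
    have hnone : ∀ pr ∈ pats, pr.1 ≠ [ch] := by
      intro pr hpr h1
      exact hpre pr hpr (h1 ▸ by simp)
    rw [pvGoB, pvSift_inr ch pats hnone]
    by_cases hemp : (pats.filterMap (pvStepB ch)).isEmpty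
    · simp [hemp]
    · simp only [hemp, Bool.false_eq_true, if_false]
      apply ih
      intro pr hpr
      obtain ⟨q, hq, hstep⟩ := List.mem_filterMap.mp hpr
      obtain ⟨rem, kw⟩ := q
      match rem with
      | [] => simp [pvStepB] at hstep
      | r0 :: rtl =>
        simp only [pvStepB] at hstep
        by_cases hc : r0 = ch
        · subst hc
          simp only [if_true, Option.some.injEq] at hstep
          subst hstep
          intro hp
          exact hpre (⟨r0 :: rtl, kw⟩) hq (List.cons_prefix_cons.mpr ⟨rfl, hp⟩)
        · simp [hc] at hstep

-- the walk along the reversed last token: the unique surviving pattern completes at the space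
theorem pvGo_match (s : String) (cs : List Char) (k₀ q : List Char) :
    ∀ (v : List Char) (n : Nat) (pats : List (List Char × List Char)),
    ((v ++ [' '], k₀) ∈ pats) →
    (∀ pr ∈ pats, pr.1 <+: (v ++ ' ' :: q) → pr.1 = v ++ [' '] ∧ pr.2 = k₀) →
    pvGoB s cs (v ++ ' ' :: q) n pats =
      (some (String.ofList (PySem.Chars.strip
        (PySem.List.slice cs none (some ((cs.length : Int) - n - v.length - 1))))),
       some (String.ofList k₀)) := by
  intro v
  induction v with
  | nil =>
    intro n pats hex huniq
    have hsift : pvSiftB ' ' pats = Sum.inl k₀ := by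
      apply pvSift_inl ' ' k₀ pats (by simpa using hex)
      intro pr hpr h1
      exact (huniq pr hpr (h1 ▸ by simp)).2
    simp only [List.nil_append]
    rw [pvGoB, hsift]
    simp
  | cons c v' ih =>
    intro n pats hex huniq
    have hnone : ∀ pr ∈ pats, pr.1 ≠ [c] := by
      intro pr hpr h1
      have := huniq pr hpr (h1 ▸ by simp)
      simp [h1] at this
    simp only [List.cons_append]
    rw [pvGoB, pvSift_inr c pats hnone]
    have hmemnxt : (v' ++ [' '], k₀) ∈ pats.filterMap (pvStepB c) := by
      apply List.mem_filterMap.mpr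
      exact ⟨(c :: (v' ++ [' ']), k₀), by simpa using hex, by simp [pvStepB]⟩
    have hemp : (pats.filterMap (pvStepB c)).isEmpty = false := by
      rcases h : (pats.filterMap (pvStepB c)).isEmpty with _ | _
      · rfl
      · rw [List.isEmpty_iff] at h
        rw [h] at hmemnxt
        simp at hmemnxt
    simp only [hemp, Bool.false_eq_true, if_false]
    have huniq' : ∀ pr ∈ pats.filterMap (pvStepB c), pr.1 <+: (v' ++ ' ' :: q) →
        pr.1 = v' ++ [' '] ∧ pr.2 = k₀ := by
      intro pr hpr hp
      obtain ⟨qq, hq, hstep⟩ := List.mem_filterMap.mp hpr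
      obtain ⟨rem, kw⟩ := qq
      match rem with
      | [] => simp [pvStepB] at hstep
      | r0 :: rtl =>
        simp only [pvStepB] at hstep
        by_cases hc : r0 = c
        · subst hc
          simp only [if_true, Option.some.injEq] at hstep
          subst hstep
          have hp' : rtl <+: v' ++ ' ' :: q := by simpa using hp
          have hpre2 : r0 :: rtl <+: r0 :: (v' ++ ' ' :: q) :=
            List.cons_prefix_cons.mpr ⟨rfl, hp'⟩
          have := huniq (⟨r0 :: rtl, kw⟩) hq (by simpa using hpre2)
          simp only [List.cons_append, List.cons.injEq] at this
          exact ⟨this.1.2, this.2⟩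
        · simp [hc] at hstep
    rw [ih (n + 1) _ hmemnxt huniq']
    have harith : ((cs.length : Int) - ((n + 1 : Nat) : Int) - v'.length - 1)
        = ((cs.length : Int) - n - ((c :: v').length : Int) - 1) := by
      simp only [List.length_cons]
      push_cast
      ring
    rw [harith]

theorem pv_kwA_nospace : ∀ kw ∈ pvKwA, ' ' ∉ kw := by decide

-- B's pattern list is exactly A's keyword list, reversed and space-terminated
theorem pv_patsB_eq : pvPatsB = pvKwA.map (fun kw => (kw.reverse ++ [' '], kw)) := by decide

-- ===== VERDICT (by name: the statement is the Claim_ definition above) =====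
theorem parse_locality_py_spec : Claim_equal_parse_locality_py := by
  intro s _
  unfold Spec_parse_locality_py
  unfold parse_locality_py parse_locality_py_alt
  by_cases hp : (PySem.Chars.isIn ['('] s.toList && PySem.Chars.endswith s.toList [')']) = true
  · simp only [hp, if_true]
  · simp only [Bool.not_eq_true] at hp
    simp only [hp, Bool.false_eq_true, if_false]
    by_cases hsp : ' ' ∈ s.toList
    · obtain ⟨hdec, htok⟩ := pv_decomp s.toList hsp
      set p := ((s.toList.reverse.dropWhile (fun c => c != ' ')).tail).reverse with hpdef
      set t := (s.toList.reverse.takeWhile (fun c => c != ' ')).reverse with htdef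
      have hrev : s.toList.reverse = t.reverse ++ ' ' :: p.reverse := by
        conv => lhs; rw [hdec]
        simp
      conv => lhs; rw [hdec]
      rw [pv_scan_spec s p t htok pvKwA pv_kwA_nospace]  -- A characterized
      conv => rhs; rw [hrev]
      by_cases hkw : pvKwA.contains t
      · -- keyword found: B's walk completes at the space
        have hlen : s.toList.length = p.length + 1 + t.length := by
          conv => lhs; rw [hdec]
          simp [List.length_append]
          omega
        have hmem : (t.reverse ++ [' '], t) ∈ pvPatsB := by
          rw [pv_patsB_eq]
          apply List.mem_map.mpr
          exact ⟨t, by simpa using hkw, by simp⟩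
        have huniq : ∀ pr ∈ pvPatsB, pr.1 <+: (t.reverse ++ ' ' :: p.reverse) →
            pr.1 = t.reverse ++ [' '] ∧ pr.2 = t := by
          intro pr hpr hpre
          rw [pv_patsB_eq] at hpr
          obtain ⟨kw, hkwmem, hkweq⟩ := List.mem_map.mp hpr
          subst hkweq
          have hkwns : ' ' ∉ kw.reverse := by
            simpa using pv_kwA_nospace kw hkwmem
          have htns : ' ' ∉ t.reverse := by simpa using htok
          have : kw.reverse = t.reverse :=
            (pv_prefix_space kw.reverse t.reverse p.reverse hkwns htns).mp hpre
          have hkt : kw = t := by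
            have := congrArg List.reverse this
            simpa using this
          subst hkt
          exact ⟨rfl, rfl⟩
        rw [pvGo_match s s.toList t p.reverse t.reverse 0 pvPatsB hmem huniq]
        have hq : pvKwA.contains t := hkw
        rw [if_pos hq]
        have hidx : ((s.toList.length : Int) - ((0 : Nat) : Int) - (t.reverse.length : Int) - 1)
            = ((p.length : Nat) : Int) := by
          simp only [List.length_reverse]
          rw [hlen]
          push_cast
          ring
        rw [hidx, PySem.List.slice_to_natCast]
        conv => rhs; rw [hdec]
        rw [List.take_left]
      · -- no keyword: both return (s, None)
        have hq : pvKwA.contains t = false := by simpa using hkw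
        rw [hq]
        simp only [Bool.false_eq_true, if_false]
        rw [pvGo_nomatch s s.toList _ 0 pvPatsB]
        intro pr hpr hpre
        rw [pv_patsB_eq] at hpr
        obtain ⟨kw, hkwmem, hkweq⟩ := List.mem_map.mp hpr
        subst hkweq
        have hkwns : ' ' ∉ kw.reverse := by simpa using pv_kwA_nospace kw hkwmem
        have htns : ' ' ∉ t.reverse := by simpa using htok
        have : kw.reverse = t.reverse :=
          (pv_prefix_space kw.reverse t.reverse p.reverse hkwns htns).mp hpre
        have hkt : kw = t := by
          have := congrArg List.reverse this
          simpa using this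
        subst hkt
        exact absurd (by simpa using hkwmem) (by simpa using hkw)
    · rw [pv_scan_nospace s s.toList hsp pvKwA]
      rw [pvGo_nomatch s s.toList s.toList.reverse 0 pvPatsB]
      intro pr hpr hpre
      rw [pv_patsB_eq] at hpr
      obtain ⟨kw, hkwmem, hkweq⟩ := List.mem_map.mp hpr
      subst hkweq
      have : ' ' ∈ s.toList.reverse := hpre.mem (by simp)
      exact hsp (by simpa using this)
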